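-- pv_equiv track=rewrite | github.com/ArcHound/advent_of_code | aoc/year2025/day06.py | parse_data_2
-- ===== SOURCE A (Python) =====
-- def parse_data_2(in_data):
--     data = list()
--     lines = in_data.splitlines()
--     line_num = len(lines)
--     line_len = len(lines[0])
--     line_bufs = ["" for i in range(line_num)]
--     first = True
--     for i in range(line_len):
--         if not first and i + 1 < line_len and lines[-1][i + 1] in "+*":
--             data.append(line_bufs)
--             line_bufs = ["" for x in range(line_num)]
--         else:
--             for j in range(line_num):
--                 line_bufs[j] += lines[j][i]
--         first = False
--     data.append(line_bufs)
--     return data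
-- ===== SOURCE B (Python) =====
-- def parse_data_2(in_data):
--     lines = in_data.splitlines()
--     n = len(lines)
--     L = len(lines[0])
--     last = lines[-1]
--     bounds = [i for i in range(1, L - 1) if last[i + 1] in "+*"]
--     data = []
--     start = 0
--     for b in bounds:
--         data.append([lines[j][start:b] for j in range(n)])
--         start = b + 1
--     data.append([lines[j][start:L] for j in range(n)])
--     return data
-- ===== Notes on version B (the rewrite author's own statement) =====
-- stated objective: simpler
-- what changed: B first scans the last line once to build the list of separator-column indices and then emits each block by contiguous per-row string slicing, replacing A's char-by-char nested buffer accumulation with its first-column flag.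
import Mathlib
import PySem

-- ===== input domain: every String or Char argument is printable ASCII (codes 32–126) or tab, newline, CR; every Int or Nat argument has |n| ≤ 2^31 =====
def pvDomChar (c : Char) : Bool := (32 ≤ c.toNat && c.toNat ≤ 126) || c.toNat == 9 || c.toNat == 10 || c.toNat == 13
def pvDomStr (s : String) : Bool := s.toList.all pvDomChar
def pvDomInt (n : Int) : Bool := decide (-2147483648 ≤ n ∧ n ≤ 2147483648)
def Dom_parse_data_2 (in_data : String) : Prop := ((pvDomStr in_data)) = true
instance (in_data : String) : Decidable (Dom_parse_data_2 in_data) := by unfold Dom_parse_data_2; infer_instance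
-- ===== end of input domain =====

-- B replaces A's per-character buffer accumulation by a one-pass boundary-index scan of the
-- last line followed by contiguous per-row slicing (objective: a simpler, differently-shaped traversal).

-- ===== PORT A =====
-- loop body of A's 'for i in range(line_len)' (state = (data, line_bufs, first))
def pvStepA (lines : List (List Char)) (line_len : Int)
    (st : List (List (List Char)) × List (List Char) × Bool) (i : Int) :
    List (List (List Char)) × List (List Char) × Bool :=
  if st.2.2 = false ∧ i + 1 < line_len ∧
      (PySem.List.pyGetD (PySem.List.pyGetD lines (-1) []) (i + 1) ' ' = '+' ∨
       PySem.List.pyGetD (PySem.List.pyGetD lines (-1) []) (i + 1) ' ' = '*')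
  then (st.1 ++ [st.2.1], List.replicate lines.length [], false)
  else (st.1, List.zipWith (fun buf line => buf ++ [PySem.List.pyGetD line i ' ']) st.2.1 lines, false)

def parse_data_2 (in_data : String) : List (List String) :=
  let lines : List (List Char) := (PySem.Str.splitlines in_data).map String.toList
  let line_len : Int := ((PySem.List.pyGetD lines 0 []).length : Int)
  let st := (PySem.List.pyRange 0 line_len 1).foldl (pvStepA lines line_len)
      ([], List.replicate lines.length [], true)
  (st.1 ++ [st.2.1]).map (List.map String.ofList)

-- ===== PORT B =====
-- loop body of B's 'for b in bounds' (state = (data, start))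
def pvStepB (lines : List (List Char)) (st : List (List (List Char)) × Int) (b : Int) :
    List (List (List Char)) × Int :=
  (st.1 ++ [lines.map (fun l => PySem.List.slice l (some st.2) (some b))], b + 1)

def parse_data_2_alt (in_data : String) : List (List String) :=
  let lines : List (List Char) := (PySem.Str.splitlines in_data).map String.toList
  let L : Int := ((PySem.List.pyGetD lines 0 []).length : Int)
  let last := PySem.List.pyGetD lines (-1) []
  let bounds := (PySem.List.pyRange 1 (L - 1) 1).filter
      (fun i => decide (PySem.List.pyGetD last (i + 1) ' ' = '+' ∨
                        PySem.List.pyGetD last (i + 1) ' ' = '*'))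
  let st := bounds.foldl (pvStepB lines) ([], 0)
  (st.1 ++ [lines.map (fun l => PySem.List.slice l (some st.2) (some L))]).map (List.map String.ofList)

-- ===== PRECONDITION & SPEC =====
-- Pre_ = exactly where the Python A returns: at least one line (A indexes lines[0]) and every
-- line at least as long as the first (A reads column i of every line for each non-separator i).
def Pre_parse_data_2 (in_data : String) : Prop :=
  PySem.Str.splitlines in_data ≠ [] ∧
  ∀ l ∈ PySem.Str.splitlines in_data,
    PySem.Str.len ((PySem.Str.splitlines in_data).headD "") ≤ PySem.Str.len l
instance (in_data : String) : Decidable (Pre_parse_data_2 in_data) := by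
  unfold Pre_parse_data_2; infer_instance

def pvWitness_parse_data_2 : String := "12*34\n56*78"

def Spec_parse_data_2 (in_data : String) (out : List (List String)) : Prop := out = parse_data_2_alt in_data
instance (in_data : String) (out : List (List String)) : Decidable (Spec_parse_data_2 in_data out) := by unfold Spec_parse_data_2; infer_instance

-- ===== CLAIM (what is proved, stated in full; the proofs are below) =====
def Claim_equal_parse_data_2 : Prop := ∀ (in_data : String), Dom_parse_data_2 in_data → Pre_parse_data_2 in_data → Spec_parse_data_2 in_data (parse_data_2 in_data)

-- ===== LEMMAS AND PROOFS =====

-- A's boundary test at column i (once 'first' is false, i.e. 1 ≤ i)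
def pvP (lines : List (List Char)) (L : Int) (i : Int) : Bool :=
  decide (1 ≤ i ∧ i + 1 < L ∧
    (PySem.List.pyGetD (PySem.List.pyGetD lines (-1) []) (i + 1) ' ' = '+' ∨
     PySem.List.pyGetD (PySem.List.pyGetD lines (-1) []) (i + 1) ' ' = '*'))

lemma pv_slice_nil (l : List Char) (s : Nat) :
    PySem.List.slice l (some (s : Int)) (some (s : Int)) = [] := by
  rw [PySem.List.slice_toNat l (by omega) (by omega)]
  simp

lemma pv_slice_snoc (l : List Char) (s k : Nat) (hs : s ≤ k) (hk : k < l.length) :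
    PySem.List.slice l (some (s : Int)) (some ((k : Int) + 1)) =
      PySem.List.slice l (some (s : Int)) (some (k : Int)) ++ [PySem.List.pyGetD l (k : Int) ' '] := by
  rw [PySem.List.slice_toNat l (by omega) (by omega),
      PySem.List.slice_toNat l (by omega) (by omega),
      PySem.List.pyGetD_eq_getElem l ' ' (by omega) (by exact_mod_cast hk)]
  simp only [Int.toNat_natCast, show ((k : Int) + 1).toNat = k + 1 by omega]
  rw [show k + 1 - s = (k - s) + 1 by omega, List.take_add_one]
  congr 1
  rw [List.getElem?_drop, show s + (k - s) = k by omega, List.getElem?_eq_getElem hk]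
  rfl

lemma pv_bufs_step (ls : List (List Char)) (k s : Nat) (hs : s ≤ k)
    (hlen : ∀ l ∈ ls, k < l.length) :
    List.zipWith (fun buf line => buf ++ [PySem.List.pyGetD line (k : Int) ' '])
      (ls.map (fun l => PySem.List.slice l (some (s : Int)) (some (k : Int)))) ls
    = ls.map (fun l => PySem.List.slice l (some (s : Int)) (some ((k : Int) + 1))) := by
  induction ls with
  | nil => rfl
  | cons l t iht =>
      simp only [List.map_cons, List.zipWith_cons_cons, List.cons.injEq]
      exact ⟨(pv_slice_snoc l s k hs (hlen l (List.mem_cons_self))).symm,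
        iht (fun x hx => hlen x (List.mem_cons_of_mem l hx))⟩

lemma pv_inv (ls : List (List Char)) (L : Nat) (hlen : ∀ l ∈ ls, L ≤ l.length)
    (k : Nat) (hk : k ≤ L) :
    (((List.range k).map (fun j : Nat => (j : Int))).foldl (pvStepA ls (L : Int))
        ([], List.replicate ls.length [], true))
      = (((((List.range k).map (fun j : Nat => (j : Int))).filter (pvP ls (L : Int))).foldl (pvStepB ls) ([], 0)).1,
         ls.map (fun l => PySem.List.slice l
           (some ((((List.range k).map (fun j : Nat => (j : Int))).filter (pvP ls (L : Int))).foldl (pvStepB ls) ([], 0)).2)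
           (some (k : Int))),
         decide (k = 0))
    ∧ ∃ s : Nat,
        ((((List.range k).map (fun j : Nat => (j : Int))).filter (pvP ls (L : Int))).foldl (pvStepB ls) ([], 0)).2 = (s : Int)
        ∧ s ≤ k := by
  induction k with
  | zero =>
      refine ⟨?_, 0, rfl, le_refl 0⟩
      simp only [List.range_zero, List.map_nil, List.filter_nil, List.foldl_nil, Prod.mk.injEq]
      refine ⟨trivial, ?_, by simp⟩
      have h0 : ∀ l ∈ ls, PySem.List.slice l (some (0 : Int)) (some (0 : Int)) = [] := by
        intro l _
        have := pv_slice_nil l 0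
        simpa using this
      simp only [Nat.cast_zero]
      rw [List.map_congr_left h0]
      simp [List.map_const']
  | succ k ih =>
      obtain ⟨ih1, s, hs, hsk⟩ := ih (by omega)
      simp only [List.range_succ, List.map_append, List.filter_append, List.foldl_append,
        List.map_cons, List.map_nil, List.foldl_cons, List.foldl_nil, List.filter_cons,
        List.filter_nil] at ih1 ⊢
      rw [ih1]
      have hc1 : ((k + 1 : Nat) : Int) = (k : Int) + 1 := by push_cast; ring
      by_cases hP : pvP ls (L : Int) (k : Int) = true
      · have hPk := of_decide_eq_true hP
        obtain ⟨hk1, hkL, hsep⟩ := hPk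
        have hk0 : ¬ (k = 0) := by omega
        simp only [hP, if_true, List.foldl_cons, List.foldl_nil]
        unfold pvStepA pvStepB
        rw [if_pos ⟨by simp [hk0], hkL, hsep⟩]
        dsimp only
        constructor
        · simp only [Prod.mk.injEq]
          refine ⟨trivial, ?_, by simp⟩
          have h0 : ∀ l ∈ ls, PySem.List.slice l (some ((k : Int) + 1)) (some ((k + 1 : Nat) : Int)) = [] := by
            intro l _
            rw [← hc1]
            exact pv_slice_nil l (k + 1)
          rw [List.map_congr_left h0]
          simp [List.map_const']
        · exact ⟨k + 1, by rw [hc1], le_refl _⟩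
      · have hP' : pvP ls (L : Int) (k : Int) = false := by simpa using hP
        rw [hP', if_neg (by simp : ¬ (false = true)), List.foldl_nil]
        have hcond : ¬ (decide (k = 0) = false ∧ (k : Int) + 1 < (L : Int) ∧
            (PySem.List.pyGetD (PySem.List.pyGetD ls (-1) []) ((k : Int) + 1) ' ' = '+' ∨
             PySem.List.pyGetD (PySem.List.pyGetD ls (-1) []) ((k : Int) + 1) ' ' = '*')) := by
          intro ⟨hfirst, hkL, hsep⟩
          have hk1 : (1 : Int) ≤ (k : Int) := by
            rcases Nat.eq_zero_or_pos k with h0 | h0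
            · simp [h0] at hfirst
            · exact_mod_cast h0
          have : pvP ls (L : Int) (k : Int) = true := by
            simp only [pvP, decide_eq_true_eq]
            exact ⟨hk1, hkL, hsep⟩
          rw [this] at hP'
          simp at hP'
        constructor
        · unfold pvStepA
          rw [if_neg hcond]
          simp only [Prod.mk.injEq]
          refine ⟨trivial, ?_, by simp⟩
          rw [hs, hc1]
          exact pv_bufs_step ls k s hsk (fun l hl => by have := hlen l hl; omega)
        · exact ⟨s, hs, by omega⟩

lemma pv_bounds (ls : List (List Char)) (L : Nat) :
    ((List.range L).map (fun j : Nat => (j : Int))).filter (pvP ls (L : Int)) =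
      (PySem.List.pyRange 1 ((L : Int) - 1) 1).filter
        (fun i => decide (PySem.List.pyGetD (PySem.List.pyGetD ls (-1) []) (i + 1) ' ' = '+' ∨
                          PySem.List.pyGetD (PySem.List.pyGetD ls (-1) []) (i + 1) ' ' = '*')) := by
  rw [← PySem.List.pyRange_zero_natCast L]
  by_cases hL2 : 2 ≤ L
  · rw [PySem.List.pyRange_one_append 0 1 (L : Int) (by omega) (by omega),
        PySem.List.pyRange_one_append 1 ((L : Int) - 1) (L : Int) (by omega) (by omega),
        show PySem.List.pyRange 0 1 1 = [0] by
          rw [PySem.List.pyRange_one_cons (by omega), PySem.List.pyRange_one_eq_nil (by omega)],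
        show PySem.List.pyRange ((L : Int) - 1) (L : Int) 1 = [(L : Int) - 1] by
          rw [PySem.List.pyRange_one_cons (by omega), PySem.List.pyRange_one_eq_nil (by omega)]]
    rw [List.filter_append, List.filter_append]
    rw [show List.filter (pvP ls (L : Int)) [0] = [] by
          simp only [List.filter_cons, List.filter_nil]
          rw [if_neg (by simp [pvP])],
        show List.filter (pvP ls (L : Int)) [(L : Int) - 1] = [] by
          simp only [List.filter_cons, List.filter_nil]
          rw [if_neg (by simp only [pvP, decide_eq_true_eq]; intro ⟨_, h, _⟩; omega)]]
    rw [List.nil_append, List.append_nil]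
    refine List.filter_congr (fun i hi => ?_)
    obtain ⟨hi1, hi2⟩ := PySem.List.mem_pyRange_one.mp hi
    have h1 : (1 : Int) ≤ i := hi1
    have h2 : i + 1 < (L : Int) := by omega
    simp [pvP, h1, h2]
  · rw [PySem.List.pyRange_one_eq_nil (show (L : Int) - 1 ≤ 1 by omega), List.filter_nil]
    refine List.filter_eq_nil_iff.mpr (fun a ha => ?_)
    obtain ⟨ha1, ha2⟩ := PySem.List.mem_pyRange_one.mp ha
    simp only [pvP, decide_eq_true_eq]
    intro ⟨h1, h2, _⟩
    omega

-- ===== VERDICT (by name: the statement is the Claim_ definition above) =====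
theorem parse_data_2_spec : Claim_equal_parse_data_2 := by
  intro in_data _ hpre
  unfold Spec_parse_data_2
  obtain ⟨hne, hlenS⟩ := hpre
  rcases hsplit : PySem.Str.splitlines in_data with _ | ⟨l0, rest⟩
  · exact absurd hsplit hne
  rw [hsplit] at hlenS
  simp only [List.headD_cons, PySem.Str.len_eq] at hlenS
  have hlen : ∀ l ∈ (l0 :: rest).map String.toList, l0.toList.length ≤ l.length := by
    intro l hl
    obtain ⟨t, ht, rfl⟩ := List.mem_map.mp hl
    exact_mod_cast hlenS t ht
  simp only [parse_data_2, parse_data_2_alt, hsplit, List.map_cons, PySem.List.pyGetD_zero_cons]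
  rw [PySem.List.pyRange_zero_natCast]
  obtain ⟨hA, -⟩ := pv_inv (l0.toList :: rest.map String.toList) l0.toList.length
    (by simpa using hlen) l0.toList.length (le_refl _)
  rw [hA, pv_bounds]
  rfl
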